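-- pv_equiv track=rewrite | github.com/eric-mckinley/adventofcode | year2017/day06/day6.py | spreadValues
-- ===== SOURCE A (Python) =====
-- def spreadValues(startindex, numberlist):
--     spread = numberlist[startindex]
--
--     numberlist[startindex] = 0
--     insertindex = startindex +1
--     while spread > 0:
--         if insertindex >= len(numberlist) :
--             insertindex = insertindex - len(numberlist)
--         numberlist[insertindex] = numberlist[insertindex] + 1
--         spread -= 1
--         insertindex += 1
--     return numberlist
-- ===== SOURCE B (Python) =====
-- def spreadValues(startindex, numberlist):
--     n = len(numberlist)
--     spread = numberlist[startindex]
--     numberlist[startindex] = 0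
--     if spread > 0:
--         q, r = divmod(spread, n)
--         start = startindex % n
--         for i in range(n):
--             numberlist[i] += q + (1 if (i - start - 1) % n < r else 0)
--     return numberlist
-- ===== Notes on version B (the rewrite author's own statement) =====
-- stated objective: alternative
-- what changed: Replaces the one-block-at-a-time circular distribution loop by a single arithmetic pass adding spread//n to every cell plus 1 to the spread%n cells following startindex circularly.
import Mathlib
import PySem

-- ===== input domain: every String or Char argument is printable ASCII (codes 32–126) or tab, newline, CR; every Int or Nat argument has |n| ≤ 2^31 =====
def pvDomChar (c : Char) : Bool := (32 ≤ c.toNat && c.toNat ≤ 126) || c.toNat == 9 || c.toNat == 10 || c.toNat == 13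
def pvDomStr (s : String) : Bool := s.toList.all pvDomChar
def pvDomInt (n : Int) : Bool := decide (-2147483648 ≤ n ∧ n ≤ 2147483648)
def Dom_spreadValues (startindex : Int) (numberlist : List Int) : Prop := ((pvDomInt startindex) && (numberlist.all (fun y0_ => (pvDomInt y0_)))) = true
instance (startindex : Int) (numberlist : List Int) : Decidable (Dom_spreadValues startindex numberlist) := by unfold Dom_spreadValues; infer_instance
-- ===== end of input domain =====

-- B replaces A's one-block-at-a-time circular distribution loop by a single arithmetic pass:
-- add spread//n everywhere plus 1 to the r = spread%n positions after startindex (circularly).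
-- Both A and B mutate the Python list in place the same way; the theorems are about the return value.

-- ===== PORT A =====
-- the while loop: fuel = spread (the loop runs exactly `spread` times when spread > 0)
def spreadLoopA : Nat → Int → List Int → List Int
  | 0, _, l => l
  | fuel+1, j, l =>
    let j2 := if j ≥ (l.length : Int) then j - (l.length : Int) else j
    spreadLoopA fuel (j2 + 1) (PySem.List.pySetD l j2 (PySem.List.pyGetD l j2 0 + 1))

def spreadValues (startindex : Int) (numberlist : List Int) : List Int :=
  match PySem.List.pyGet? numberlist startindex with
  | none => numberlist   -- IndexError in Python: excluded by Pre_
  | some spread =>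
      spreadLoopA spread.toNat (startindex + 1) (PySem.List.pySetD numberlist startindex 0)

-- ===== PORT B =====
def spreadValues_alt (startindex : Int) (numberlist : List Int) : List Int :=
  let n : Int := (numberlist.length : Int)
  match PySem.List.pyGet? numberlist startindex with
  | none => numberlist   -- IndexError in Python: excluded by Pre_
  | some spread =>
      let l0 := PySem.List.pySetD numberlist startindex 0
      if spread > 0 then
        let q := PySem.Int.floordiv spread n
        let r := PySem.Int.mod spread n
        let start := PySem.Int.mod startindex n
        (PySem.List.pyRange 0 n 1).foldl (fun l i =>
          PySem.List.pySetD l i (PySem.List.pyGetD l i 0 + q +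
            (if PySem.Int.mod (i - start - 1) n < r then 1 else 0))) l0
      else l0

-- ===== PRECONDITION & SPEC =====
-- Pre_ = exactly the indices Python accepts: everywhere else A raises IndexError on numberlist[startindex].
def Pre_spreadValues (startindex : Int) (numberlist : List Int) : Prop :=
  PySem.Raise.InRange numberlist.length startindex
instance (startindex : Int) (numberlist : List Int) : Decidable (Pre_spreadValues startindex numberlist) := by
  unfold Pre_spreadValues; infer_instance

def pvWitness_spreadValues : Int × List Int := (1, [0, 7, 2])

def Spec_spreadValues (startindex : Int) (numberlist : List Int) (out : List Int) : Prop := out = spreadValues_alt startindex numberlist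
instance (startindex : Int) (numberlist : List Int) (out : List Int) : Decidable (Spec_spreadValues startindex numberlist out) := by unfold Spec_spreadValues; infer_instance

-- ===== CLAIM (what is proved, stated in full; the proofs are below) =====
def Claim_equal_spreadValues : Prop := ∀ (startindex : Int) (numberlist : List Int), Dom_spreadValues startindex numberlist → Pre_spreadValues startindex numberlist → Spec_spreadValues startindex numberlist (spreadValues startindex numberlist)

-- ===== LEMMAS AND PROOFS =====

-- small-range values of emod
lemma emod_small (n x : Int) (h1 : -n ≤ x) (h2 : x < n) :
    x % n = if x < 0 then x + n else x := by
  split_ifs with h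
  · calc x % n = (x + n * 1) % n := (Int.add_mul_emod_self_left x n 1).symm
    _ = (x + n) % n := by ring_nf
    _ = x + n := Int.emod_eq_of_lt (by omega) (by omega)
  · exact Int.emod_eq_of_lt (by omega) h2

-- shifting the argument of emod by a multiple of n
lemma emod_add_mul (n x : Int) (k : Int) : (x + n * k) % n = x % n := by simp

-- the arithmetic heart: one more unit distributed = updated quotient/remainder indicator
lemma step_arith (n a S : Int) (hn : 0 < n) (ha : 0 ≤ a) (han : a < n) :
    (if a = 0 then (1:Int) else 0) + S / n + (if (a - 1) % n < S % n then 1 else 0)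
      = (S + 1) / n + (if a < (S + 1) % n then 1 else 0) := by
  have hb1 : 0 ≤ S % n := Int.emod_nonneg S (by omega)
  have hb2 : S % n < n := Int.emod_lt_of_pos S hn
  have h1 : (a - 1) % n = if a = 0 then n - 1 else a - 1 := by
    split_ifs with h
    · subst h
      have hm := emod_small n (-1) (by omega) (by omega)
      rw [if_pos (by omega)] at hm
      rw [show (0:Int) - 1 = -1 by ring, hm]; ring
    · exact Int.emod_eq_of_lt (by omega) (by omega)
  have hkey : S + 1 = (S % n + 1) + (S / n) * n := by
    linarith [Int.emod_add_mul_ediv S n, mul_comm (S / n) n]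
  have h2 : (S + 1) / n = (S % n + 1) / n + S / n := by
    rw [hkey, Int.add_mul_ediv_right _ _ (by omega : n ≠ 0)]
  have h3 : (S + 1) % n = (S % n + 1) % n := by
    rw [hkey]; exact Int.add_mul_emod_self_right _ _ _
  have h4 : (S % n + 1) / n = if S % n = n - 1 then 1 else 0 := by
    split_ifs with h
    · rw [show S % n + 1 = n by omega]; exact Int.ediv_self (by omega)
    · exact Int.ediv_eq_zero_of_lt (by omega) (by omega)
  have h5 : (S % n + 1) % n = if S % n = n - 1 then 0 else S % n + 1 := by
    split_ifs with h
    · rw [show S % n + 1 = n by omega]; simp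
    · exact Int.emod_eq_of_lt (by omega) (by omega)
  rw [h1, h2, h3, h4, h5]
  generalize S / n = Q at *
  generalize hb : S % n = b at *
  split_ifs <;> omega

-- in-range python index resolution
lemma pyIdx_in (n : Nat) (j : Int) (h1 : -(n:Int) ≤ j) (h2 : j < n) :
    PySem.List.pyIdx? n j = some (if 0 ≤ j then j.toNat else n - (-j).toNat) := by
  simp only [PySem.List.pyIdx?]
  split_ifs <;> rfl

lemma pyGetD_in (l : List Int) (j : Int) (h1 : -(l.length:Int) ≤ j) (h2 : j < l.length) :
    PySem.List.pyGetD l j 0 = l.getD (if 0 ≤ j then j.toNat else l.length - (-j).toNat) 0 := by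
  simp only [PySem.List.pyGetD, PySem.List.pyGet?, pyIdx_in l.length j h1 h2, Option.bind_some]
  rfl

lemma pySetD_in (l : List Int) (j : Int) (v : Int) (h1 : -(l.length:Int) ≤ j) (h2 : j < l.length) :
    PySem.List.pySetD l j v = l.set (if 0 ≤ j then j.toNat else l.length - (-j).toNat) v := by
  simp only [PySem.List.pySetD, PySem.List.pySet?, pyIdx_in l.length j h1 h2, Option.map_some,
    Option.getD_some]

-- characterisation of A's while loop: position p receives s/n + (1 if (p-j) mod n < s mod n) blocks
lemma loopA_spec (n : Nat) (hn : 0 < n) :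
    ∀ (s : Nat) (j : Int) (l : List Int), l.length = n → -(n:Int) < j → j ≤ n →
      (spreadLoopA s j l).length = n ∧
      ∀ p : Nat, p < n →
        (spreadLoopA s j l).getD p 0
          = l.getD p 0 + (s : Int) / n +
            (if ((p:Int) - j) % n < (s:Int) % n then 1 else 0) := by
  intro s
  induction s with
  | zero =>
    intro j l hl _ _
    refine ⟨hl, fun p hp => ?_⟩
    have : (((p:Int) - j) % n) ≥ 0 := Int.emod_nonneg _ (by omega)
    simp [spreadLoopA]
    omega
  | succ s ih =>
    intro j l hl hj1 hj2
    have hnn : (0:Int) < n := by exact_mod_cast hn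
    -- unfold one loop step
    have hstep : spreadLoopA (s+1) j l =
        spreadLoopA s ((if j ≥ (l.length : Int) then j - (l.length : Int) else j) + 1)
          (PySem.List.pySetD l (if j ≥ (l.length : Int) then j - (l.length : Int) else j)
            (PySem.List.pyGetD l (if j ≥ (l.length : Int) then j - (l.length : Int) else j) 0 + 1)) := rfl
    set j2 : Int := if j ≥ (l.length : Int) then j - (l.length : Int) else j with hj2def
    have hj2a : -(n:Int) < j2 := by simp only [hj2def, hl]; split_ifs <;> omega
    have hj2b : j2 < n := by simp only [hj2def, hl]; split_ifs <;> omega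
    -- the written position t
    set t : Nat := if 0 ≤ j2 then j2.toNat else l.length - (-j2).toNat with htdef
    have htlt : t < n := by simp only [htdef, hl]; split_ifs <;> omega
    have htj2 : (t:Int) = j2 ∨ (t:Int) = j2 + n := by
      simp only [htdef, hl]; split_ifs with h
      · left; omega
      · right; omega
    have hget : PySem.List.pyGetD l j2 0 = l.getD t 0 := by
      rw [pyGetD_in l j2 (by omega) (by omega)]
    have hset : PySem.List.pySetD l j2 (PySem.List.pyGetD l j2 0 + 1)
        = l.set t (l.getD t 0 + 1) := by
      rw [hget, pySetD_in l j2 _ (by omega) (by omega)]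
    set l' : List Int := l.set t (l.getD t 0 + 1) with hl'def
    have hl' : l'.length = n := by simp [hl'def, hl]
    obtain ⟨hlen, hptw⟩ := ih (j2 + 1) l' hl' (by omega) (by omega)
    rw [hstep, hset]
    refine ⟨hlen, fun p hp => ?_⟩
    rw [hptw p hp]
    -- element of l' at p
    have hpl : p < l.length := by omega
    have hl'p : l'.getD p 0 = l.getD p 0 + (if t = p then 1 else 0) := by
      simp only [hl'def]
      rw [List.getD_eq_getElem _ 0 (show p < (l.set t (l.getD t 0 + 1)).length by
        simpa using hpl), List.getElem_set]
      split_ifs with h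
      · subst h; rfl
      · rw [← List.getD_eq_getElem l 0 hpl]; ring
    rw [hl'p]
    -- arithmetic
    set a : Int := ((p:Int) - j) % n with hadef
    have hja : ((p:Int) - j2) % n = a := by
      simp only [hadef, hj2def, hl]; split_ifs with h
      · have : (p:Int) - (j - n) = ((p:Int) - j) + n * 1 := by ring
        rw [this, emod_add_mul]
      · rfl
    have ha0 : 0 ≤ a := by
      simp only [hadef]; exact Int.emod_nonneg _ (by omega)
    have han : a < n := by
      simp only [hadef]; exact Int.emod_lt_of_pos _ hnn
    have hta : ((p:Int) - (t:Int)) % n = a := by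
      rcases htj2 with h | h
      · rw [h]; exact hja
      · have : (p:Int) - t = ((p:Int) - j2) + n * (-1) := by omega
        rw [this, emod_add_mul]; exact hja
    have htp : (t = p) ↔ (a = 0) := by
      constructor
      · intro h; subst h; rw [← hta]; simp
      · intro h
        have hsmall : ((p:Int) - t) % n = if ((p:Int) - t) < 0 then (p:Int) - t + n else (p:Int) - t :=
          emod_small n _ (by omega) (by omega)
        rw [hta, h] at hsmall
        split_ifs at hsmall <;> omega
    have hA' : ((p:Int) - (j2 + 1)) % n = (a - 1) % n := by
      have hq := Int.mul_ediv_add_emod ((p:Int) - j2) n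
      rw [hja] at hq
      have : (p:Int) - (j2 + 1) = (a - 1) + n * (((p:Int) - j2) / n) := by omega
      rw [this, emod_add_mul]
    rw [hA']
    have harr := step_arith n a (s:Int) hnn ha0 han
    have hcast : ((s+1 : Nat) : Int) = (s:Int) + 1 := by push_cast; ring
    rw [hcast]
    have hδ : (if t = p then (1:Int) else 0) = (if a = 0 then 1 else 0) := by
      simp [htp]
    rw [hδ]
    omega

-- characterisation of B's single pass: add f k to position k
lemma foldB_spec (f : Nat → Int) :
    ∀ (m : Nat) (l : List Int), m ≤ l.length →
      ((List.range m).foldl (fun l k => l.set k (l.getD k 0 + f k)) l).length = l.length ∧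
      ∀ p : Nat, p < l.length →
        ((List.range m).foldl (fun l k => l.set k (l.getD k 0 + f k)) l).getD p 0
          = l.getD p 0 + (if p < m then f p else 0) := by
  intro m
  induction m with
  | zero => intro l _; refine ⟨rfl, fun p hp => by simp⟩
  | succ m ih =>
    intro l hm
    obtain ⟨hlen, hptw⟩ := ih l (by omega)
    rw [List.range_succ, List.foldl_append]
    set prev := (List.range m).foldl (fun l k => l.set k (l.getD k 0 + f k)) l with hprev
    simp only [List.foldl_cons, List.foldl_nil]
    refine ⟨by simpa using hlen, fun p hp => ?_⟩
    have hmlen : m < prev.length := by omega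
    have hplen : p < prev.length := by omega
    rw [List.getD_eq_getElem _ 0 (show p < (prev.set m (prev.getD m 0 + f m)).length by
      simpa using hplen), List.getElem_set]
    rcases eq_or_ne m p with h | h
    · subst h
      rw [if_pos rfl, hptw m hp, if_neg (lt_irrefl m), if_pos (Nat.lt_succ_self m)]
      ring
    · rw [if_neg h, ← List.getD_eq_getElem prev 0 hplen, hptw p hp]
      by_cases hcase : p < m
      · rw [if_pos hcase, if_pos (by omega)]
      · rw [if_neg hcase, if_neg (by omega)]

-- ===== VERDICT (by name: the statement is the Claim_ definition above) =====
theorem spreadValues_spec : Claim_equal_spreadValues := by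
  intro startindex numberlist _ hpre
  unfold Spec_spreadValues
  obtain ⟨hlo, hhi⟩ := hpre
  set n : Nat := numberlist.length with hn
  have hn0 : 0 < n := by omega
  have hnn : (0:Int) < n := by exact_mod_cast hn0
  -- the shared head: the fetched value and the zeroed list
  cases hget : PySem.List.pyGet? numberlist startindex with
  | none =>
    rw [PySem.List.pyGet?_eq_none_iff] at hget
    exact absurd ⟨hlo, hhi⟩ hget
  | some spread =>
    set l0 : List Int := PySem.List.pySetD numberlist startindex 0 with hl0
    have hl0len : l0.length = n := by
      simp [hl0, pySetD_in numberlist startindex 0 hlo hhi, hn]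
    unfold spreadValues spreadValues_alt
    rw [hget]
    simp only [← hl0, ← hn]
    by_cases hpos : spread > 0
    · -- A via loopA_spec
      have hA := loopA_spec n hn0 spread.toNat (startindex + 1) l0 hl0len (by omega) (by omega)
      -- B: rewrite the pyRange fold into the Nat-range fold
      have hrange : PySem.List.pyRange 0 (n:Int) 1 = List.map (fun (k : Nat) => (k : Int)) (List.range n) :=
        PySem.List.pyRange_zero_nat n
      set q : Int := PySem.Int.floordiv spread n with hq
      set r : Int := PySem.Int.mod spread n with hr
      set start : Int := PySem.Int.mod startindex n with hstart
      have hq' : q = spread / n := PySem.Int.floordiv_eq_ediv_of_pos hnn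
      have hr' : r = spread % n := PySem.Int.mod_eq_emod_of_pos hnn
      have hstart' : start = startindex % n := PySem.Int.mod_eq_emod_of_pos hnn
      set f : Nat → Int := fun k => q + (if ((k:Int) - start - 1) % n < r then 1 else 0) with hf
      have hbodyeq : ∀ (l : List Int) (k : Nat),
          PySem.List.pySetD l (k:Int) (PySem.List.pyGetD l (k:Int) 0 + q +
            (if PySem.Int.mod ((k:Int) - start - 1) (n:Int) < r then 1 else 0))
          = l.set k (l.getD k 0 + f k) := by
        intro l k
        rw [PySem.Int.mod_eq_emod_of_pos hnn]
        simp [hf, PySem.List.pySetD_natCast, add_assoc]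
      obtain ⟨hBlen, hBptw⟩ := foldB_spec f n l0 (by omega)
      have hBfold :
          (PySem.List.pyRange 0 (n:Int) 1).foldl (fun l i =>
            PySem.List.pySetD l i (PySem.List.pyGetD l i 0 + q +
              (if PySem.Int.mod (i - start - 1) (n:Int) < r then 1 else 0))) l0
          = (List.range n).foldl (fun l k => l.set k (l.getD k 0 + f k)) l0 := by
        rw [hrange, List.foldl_map]
        exact congrArg (fun g => List.foldl g l0 (List.range n))
          (funext fun l => funext fun k => hbodyeq l k)
      rw [if_pos hpos, hBfold]
      -- elementwise equality
      apply List.ext_getElem (hA.1.trans (hBlen.trans hl0len).symm)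
      intro p hp1 hp2
      have hpn : p < n := by rw [← hA.1]; exact hp1
      rw [← List.getD_eq_getElem _ 0 hp1, ← List.getD_eq_getElem _ 0 hp2, hA.2 p hpn,
        hBptw p (by omega), if_pos hpn]
      have hcast : ((spread.toNat : Nat) : Int) = spread := by omega
      rw [hcast, hf]
      simp only [hq', hr']
      -- the two remainder indicators test the same residue
      have hres : ((p:Int) - start - 1) % n = ((p:Int) - (startindex + 1)) % n := by
        have hq2 := Int.mul_ediv_add_emod startindex n
        rw [← hstart'] at hq2
        have : (p:Int) - start - 1 = ((p:Int) - (startindex + 1)) + n * (startindex / n) := by omega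
        rw [this, emod_add_mul]
      rw [hres]; ring
    · -- spread ≤ 0: the loop body never runs, B takes the else branch
      have h0 : spread.toNat = 0 := by omega
      rw [if_neg hpos, h0]
      rfl
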